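-- pv_equiv track=rewrite | github.com/Necroraijin/Biomerkin | biomerkin/services/enhanced_bedrock_service.py | _extract_report_sections
-- ===== SOURCE A (Python) =====
-- from typing import Dict, Any, List, Optional, Union
--
-- def _extract_report_sections(report_text: str) -> Dict[str, str]:
--     """Extract sections from medical report text."""
--     sections = {}
--     current_section = "introduction"
--     current_content = []
--
--     for line in report_text.split('\n'):
--         if line.strip().isupper() or line.startswith('#'):
--             if current_content:
--                 sections[current_section] = '\n'.join(current_content)
--             current_section = line.strip().lower().replace('#', '').strip()
--             current_content = []
--         else:
--             current_content.append(line)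
--
--     if current_content:
--         sections[current_section] = '\n'.join(current_content)
--
--     return sections
-- ===== SOURCE B (Python) =====
-- def _extract_report_sections(report_text):
--     """Segment-at-a-time: scan to the next header, slice the segment off, repeat."""
--     def _is_header(line):
--         return line.strip().isupper() or line.startswith('#')
--
--     lines = report_text.split('\n')
--     sections = {}
--     name = "introduction"
--     while True:
--         i = 0
--         while i < len(lines) and not _is_header(lines[i]):
--             i += 1
--         if i > 0:
--             sections[name] = '\n'.join(lines[:i])
--         if i == len(lines):
--             return sections
--         name = lines[i].strip().lower().replace('#', '').strip()
--         lines = lines[i + 1:]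
-- ===== Notes on version B (the rewrite author's own statement) =====
-- stated objective: alternative
-- what changed: Replaced A's per-line state machine (sections/current_section/current_content accumulator fold) by a segment-at-a-time loop that scans for the next header index, slices the whole segment off at once, and repeats on the remainder.
import Mathlib
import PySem

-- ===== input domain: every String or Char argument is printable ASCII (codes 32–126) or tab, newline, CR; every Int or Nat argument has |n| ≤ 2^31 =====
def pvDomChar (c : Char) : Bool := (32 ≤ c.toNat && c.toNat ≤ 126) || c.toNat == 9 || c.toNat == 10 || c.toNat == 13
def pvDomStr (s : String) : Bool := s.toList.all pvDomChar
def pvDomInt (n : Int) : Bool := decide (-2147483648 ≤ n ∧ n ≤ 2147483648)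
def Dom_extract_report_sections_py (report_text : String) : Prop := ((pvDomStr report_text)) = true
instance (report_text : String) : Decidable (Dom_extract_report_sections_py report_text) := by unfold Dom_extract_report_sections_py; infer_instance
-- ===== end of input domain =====

-- B replaces A's per-line state machine by a segment-at-a-time loop (find next header, slice the
-- segment off, repeat); objective: alternative decomposition, same cost.


-- ===== PORT A =====
-- Python str.isupper(): no cased character is lowercase and at least one is uppercase
-- (exact on the ASCII domain, where the cased characters are exactly the letters).
def pvStrIsupper (s : String) : Bool :=
  s.toList.all (fun c => !(PySem.Str.islower c)) && s.toList.any (fun c => PySem.Str.isupper c)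

-- line.strip().isupper() or line.startswith('#')   (shared by both Pythons verbatim)
def pvIsHeader (line : String) : Bool :=
  pvStrIsupper (PySem.Str.strip line) || PySem.Str.startswith line "#"

-- line.strip().lower().replace('#', '').strip()   (shared by both Pythons verbatim)
def pvNorm (line : String) : String :=
  PySem.Str.strip (PySem.Str.replace (PySem.Str.lower (PySem.Str.strip line)) "#" "")

-- one iteration of A's for-loop over (sections, current_section, current_content)
def pvStepA (st : PySem.Dict String String × String × List String) (line : String) :
    PySem.Dict String String × String × List String :=
  match st with
  | (sections, cur, content) =>
    if pvIsHeader line then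
      ((if content.isEmpty then sections
        else sections.insert cur (PySem.Str.join "\n" content)), pvNorm line, [])
    else
      (sections, cur, content ++ [line])

def extract_report_sections_py (report_text : String) : List (String × String) :=
  -- report_text.split('\n'): the separator is the nonempty literal "\n", so split? is always some
  let lines := (PySem.Str.split? report_text "\n").getD []
  match lines.foldl pvStepA (PySem.Dict.empty, "introduction", []) with
  | (sections, cur, content) =>
    (if content.isEmpty then sections
     else sections.insert cur (PySem.Str.join "\n" content)).items

-- ===== PORT B =====
-- one 'while True' iteration chain of Source B: i = first header index (len(lines) if none, the inner
-- while loop = List.findIdx), flush lines[:i] under name, then continue past lines[i].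
def pvGoB (name : String) (lines : List String) (sections : PySem.Dict String String) :
    PySem.Dict String String :=
  let i := lines.findIdx pvIsHeader
  let sections := if (lines.take i).isEmpty then sections
                  else sections.insert name (PySem.Str.join "\n" (lines.take i))
  match _h : lines.drop i with
  | [] => sections
  | hd :: t => pvGoB (pvNorm hd) t sections
termination_by lines.length
decreasing_by
  have hle : (lines.drop i).length ≤ lines.length := by simp
  rw [_h] at hle; simp at hle; omega

def extract_report_sections_py_alt (report_text : String) : List (String × String) :=
  let lines := (PySem.Str.split? report_text "\n").getD []
  (pvGoB "introduction" lines PySem.Dict.empty).items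

-- ===== PRECONDITION & SPEC =====
def Spec_extract_report_sections_py (report_text : String) (out : List (String × String)) : Prop := out = extract_report_sections_py_alt report_text
instance (report_text : String) (out : List (String × String)) : Decidable (Spec_extract_report_sections_py report_text out) := by unfold Spec_extract_report_sections_py; infer_instance

-- ===== CLAIM (what is proved, stated in full; the proofs are below) =====
def Claim_equal_extract_report_sections_py : Prop := ∀ (report_text : String), Dom_extract_report_sections_py report_text → Spec_extract_report_sections_py report_text (extract_report_sections_py report_text)

-- ===== LEMMAS AND PROOFS =====

-- unfold pvGoB to a plain (non-dependent) match on the remaining lines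
theorem pvGoB_eq (name : String) (lines : List String) (sections : PySem.Dict String String) :
    pvGoB name lines sections =
      (let i := lines.findIdx pvIsHeader
       let sections' := if (lines.take i).isEmpty then sections
                        else sections.insert name (PySem.Str.join "\n" (lines.take i))
       match lines.drop i with
       | [] => sections'
       | hd :: t => pvGoB (pvNorm hd) t sections') := by
  rw [pvGoB]
  cases hdrop : lines.drop (lines.findIdx pvIsHeader) <;> simp [hdrop]

-- final flush of A's loop state
def pvFlush (st : PySem.Dict String String × String × List String) : PySem.Dict String String :=
  match st with
  | (sections, cur, content) =>
    if content.isEmpty then sections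
    else sections.insert cur (PySem.Str.join "\n" content)

-- Loop invariant: folding A's step over the remaining lines, with pending content `pre`,
-- produces the same dict as B's segment loop started at the next header boundary.
theorem pvFold_eq_goB (lines : List String) (sections : PySem.Dict String String)
    (cur : String) (pre : List String) :
    pvFlush (lines.foldl pvStepA (sections, cur, pre)) =
      (let i := lines.findIdx pvIsHeader
       let sections' := if (pre ++ lines.take i).isEmpty then sections
                        else sections.insert cur (PySem.Str.join "\n" (pre ++ lines.take i))
       match lines.drop i with
       | [] => sections'
       | hd :: t => pvGoB (pvNorm hd) t sections') := by
  induction lines generalizing sections cur pre with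
  | nil => simp [pvFlush]
  | cons l ls ih =>
    by_cases hl : pvIsHeader l = true
    · simp only [List.foldl_cons, pvStepA, hl, if_pos]
      rw [ih]
      simp only [List.findIdx_cons, hl, cond_true, List.take_zero, List.drop_zero,
        List.append_nil, List.nil_append]
      rw [pvGoB_eq]
    · simp only [List.foldl_cons, pvStepA]
      rw [if_neg (by simp [hl]), ih]
      have hfi : (l :: ls).findIdx pvIsHeader = ls.findIdx pvIsHeader + 1 := by
        simp [List.findIdx_cons, eq_false_of_ne_true hl]
      rw [hfi]
      simp [List.take_succ_cons, List.drop_succ_cons, List.append_assoc]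

theorem pvA_eq_pvB (report_text : String) :
    extract_report_sections_py report_text = extract_report_sections_py_alt report_text := by
  unfold extract_report_sections_py extract_report_sections_py_alt
  have h := pvFold_eq_goB ((PySem.Str.split? report_text "\n").getD [])
      PySem.Dict.empty "introduction" []
  simp only [List.nil_append] at h
  rw [← pvGoB_eq] at h
  have hA : (match ((PySem.Str.split? report_text "\n").getD []).foldl pvStepA
      (PySem.Dict.empty, "introduction", []) with
    | (sections, cur, content) =>
      (if content.isEmpty then sections
       else sections.insert cur (PySem.Str.join "\n" content)).items) =
      (pvFlush (((PySem.Str.split? report_text "\n").getD []).foldl pvStepA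
        (PySem.Dict.empty, "introduction", []))).items := by
    rcases ((PySem.Str.split? report_text "\n").getD []).foldl pvStepA
      (PySem.Dict.empty, "introduction", []) with ⟨s, c, ct⟩
    rfl
  rw [hA, h]

-- ===== VERDICT (by name: the statement is the Claim_ definition above) =====
theorem extract_report_sections_py_spec : Claim_equal_extract_report_sections_py := by
  intro report_text _
  exact pvA_eq_pvB report_text
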